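-- pv_equiv track=rewrite | github.com/naobservatory/sequence_tools | color-mismatches.py | remove_count_prefixes_if_present
-- ===== SOURCE A (Python) =====
-- def remove_count_prefixes_if_present(lines):
--     counts = []
--     out = []
--     for line in lines:
--         if line.count("\t") != 1:
--             break
--         count, line = line.split("\t")
--         if not count.isdigit():
--             break
--         out.append(line)
--         counts.append(int(count))
--     else:
--         # completed successfully
--         return counts, out
--
--     # not the right format, just put every count as equally common
--     return [1]*len(lines), lines
-- ===== SOURCE B (Python) =====
-- def remove_count_prefixes_if_present(lines):
--     valid = all(line.count("\t") == 1 and line.split("\t")[0].isdigit()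
--                 for line in lines)
--     if valid:
--         return ([int(line.split("\t")[0]) for line in lines],
--                 [line.split("\t")[1] for line in lines])
--     return [1] * len(lines), lines
-- ===== Notes on version B (the rewrite author's own statement) =====
-- stated objective: simpler
-- what changed: A interleaves validation and construction in one early-breaking loop with for-else and discards its partial accumulators on failure; B first computes a single boolean validity check over all lines and then builds the two result lists in separate passes (or the fallback), with no accumulator state.
import Mathlib
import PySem

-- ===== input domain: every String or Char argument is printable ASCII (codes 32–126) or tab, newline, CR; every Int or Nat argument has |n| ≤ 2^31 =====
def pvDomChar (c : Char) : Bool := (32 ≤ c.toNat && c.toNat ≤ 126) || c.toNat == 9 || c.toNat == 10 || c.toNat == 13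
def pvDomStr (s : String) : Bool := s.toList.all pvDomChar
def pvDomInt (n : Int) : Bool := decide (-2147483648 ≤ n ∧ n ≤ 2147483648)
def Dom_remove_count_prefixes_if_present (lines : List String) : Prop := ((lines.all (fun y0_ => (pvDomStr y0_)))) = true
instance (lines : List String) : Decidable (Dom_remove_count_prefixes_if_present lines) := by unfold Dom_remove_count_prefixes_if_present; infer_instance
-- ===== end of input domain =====

-- B replaces A's interleaved early-breaking loop (for-else, two accumulators) by a
-- validate-then-build decomposition: one boolean all-check, then separate construction passes (objective: simpler).

-- ===== PORT A =====
-- A's for-loop with break / else: recursion over the remaining lines carrying both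
-- accumulators; on break it returns the fallback built from the ORIGINAL list.
def pvLoopA (orig : List String) : List String → List Int → List String → List Int × List String
  | [], counts, out => (counts, out)
  | line :: rest, counts, out =>
    if PySem.Str.count line "\t" ≠ 1 then
      (List.replicate orig.length (1 : Int), orig)
    else
      -- count, line = line.split("\t")  (exactly two parts since the tab count is 1)
      let parts := ((PySem.Str.split? line "\t").getD [])
      let cnt := parts.getD 0 ""
      let line2 := parts.getD 1 ""
      if ¬ PySem.Str.strIsdigit cnt then
        (List.replicate orig.length (1 : Int), orig)
      else
        pvLoopA orig rest (counts ++ [(PySem.Int.ofStr? cnt).getD 0]) (out ++ [line2])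

def remove_count_prefixes_if_present (lines : List String) : List Int × List String :=
  pvLoopA lines lines [] []

-- ===== PORT B =====
def pvLineOk (line : String) : Bool :=
  PySem.Str.count line "\t" == 1 &&
    PySem.Str.strIsdigit ((((PySem.Str.split? line "\t").getD [])).getD 0 "")

def pvPrefixInt (line : String) : Int :=
  (PySem.Int.ofStr? ((((PySem.Str.split? line "\t").getD [])).getD 0 "")).getD 0

def pvSuffix (line : String) : String :=
  (((PySem.Str.split? line "\t").getD [])).getD 1 ""

def remove_count_prefixes_if_present_alt (lines : List String) : List Int × List String :=
  if lines.all pvLineOk then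
    (lines.map pvPrefixInt, lines.map pvSuffix)
  else
    (List.replicate lines.length (1 : Int), lines)

-- ===== PRECONDITION & SPEC =====
def Spec_remove_count_prefixes_if_present (lines : List String) (out : List Int × List String) : Prop := out = remove_count_prefixes_if_present_alt lines
instance (lines : List String) (out : List Int × List String) : Decidable (Spec_remove_count_prefixes_if_present lines out) := by unfold Spec_remove_count_prefixes_if_present; infer_instance

-- ===== CLAIM (what is proved, stated in full; the proofs are below) =====
def Claim_equal_remove_count_prefixes_if_present : Prop := ∀ (lines : List String), Dom_remove_count_prefixes_if_present lines → Spec_remove_count_prefixes_if_present lines (remove_count_prefixes_if_present lines)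

-- ===== LEMMAS AND PROOFS =====

-- A's loop equals: if every remaining line is valid, append the built lists; else the fallback.
theorem pvLoopA_eq (orig : List String) :
    ∀ (rest : List String) (counts : List Int) (out : List String),
      pvLoopA orig rest counts out =
        if rest.all pvLineOk then
          (counts ++ rest.map pvPrefixInt, out ++ rest.map pvSuffix)
        else
          (List.replicate orig.length (1 : Int), orig) := by
  intro rest
  induction rest with
  | nil => intro counts out; simp [pvLoopA]
  | cons line rest ih =>
    intro counts out
    by_cases h1 : PySem.Str.count line "\t" = 1
    · by_cases h2 : PySem.Str.strIsdigit ((((PySem.Str.split? line "\t").getD [])).getD 0 "") = true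
      · simp at h1 h2
        simp [pvLoopA, h1, h2, ih, pvLineOk, pvPrefixInt, pvSuffix]
      · simp at h1 h2
        simp [pvLoopA, h1, h2, pvLineOk]
    · simp at h1
      simp [pvLoopA, h1, pvLineOk]

-- ===== VERDICT (by name: the statement is the Claim_ definition above) =====
theorem remove_count_prefixes_if_present_spec : Claim_equal_remove_count_prefixes_if_present := by
  intro lines _
  unfold Spec_remove_count_prefixes_if_present remove_count_prefixes_if_present remove_count_prefixes_if_present_alt
  rw [pvLoopA_eq]
  split <;> simp
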